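-- pv_equiv track=rewrite | github.com/msyksphinz-self/training | translate/translate.py | correct_code_text
-- ===== SOURCE A (Python) =====
-- def correct_code_text(old, new):
--     CHAR_CODE = '`'
--     old_code_cnt = old.count(CHAR_CODE)
--     new_code_cnt = new.count(CHAR_CODE)
--     result = new
--     if (old_code_cnt == new_code_cnt) and (old_code_cnt%2 == 0) and (new_code_cnt%2 == 0):
--         old_idx = 0
--         new_idx = 0
--         for i in range(0, int(old_code_cnt/2)):
--             first_old = old.index(CHAR_CODE, old_idx)
--             old_idx = first_old + 1
--             second_old = old.index(CHAR_CODE, old_idx)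
--             old_idx = second_old + 1
--             first_new = new.index(CHAR_CODE, new_idx)
--             new_idx = first_new + 1
--             second_new = new.index(CHAR_CODE, new_idx)
--             new_idx = second_new + 1
--             old_str = old[first_old:(second_old + 1)]
--             new_str = new[first_new:(second_new + 1)]
--             result = result.replace(new_str, old_str)
--
--     return result
-- ===== SOURCE B (Python) =====
-- def _spans(s):
--     # one-pass scan collecting complete backtick spans '`...`'
--     spans = []
--     cur = ''
--     inside = False
--     for ch in s:
--         if inside:
--             cur = cur + ch
--             if ch == '`':
--                 spans.append(cur)
--                 inside = False
--         elif ch == '`':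
--             cur = '`'
--             inside = True
--     return spans
--
--
-- def correct_code_text(old, new):
--     result = new
--     if old.count('`') == new.count('`') and old.count('`') % 2 == 0:
--         for old_span, new_span in zip(_spans(old), _spans(new)):
--             result = result.replace(new_span, old_span)
--     return result
-- ===== Notes on version B (the rewrite author's own statement) =====
-- stated objective: alternative
-- what changed: A's span extraction by repeated str.index calls with running indices and slicing is replaced by a single-pass state-machine scan that collects complete backtick spans in one traversal; the guard and the ordered global-replace phase are kept identical.
import Mathlib
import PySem

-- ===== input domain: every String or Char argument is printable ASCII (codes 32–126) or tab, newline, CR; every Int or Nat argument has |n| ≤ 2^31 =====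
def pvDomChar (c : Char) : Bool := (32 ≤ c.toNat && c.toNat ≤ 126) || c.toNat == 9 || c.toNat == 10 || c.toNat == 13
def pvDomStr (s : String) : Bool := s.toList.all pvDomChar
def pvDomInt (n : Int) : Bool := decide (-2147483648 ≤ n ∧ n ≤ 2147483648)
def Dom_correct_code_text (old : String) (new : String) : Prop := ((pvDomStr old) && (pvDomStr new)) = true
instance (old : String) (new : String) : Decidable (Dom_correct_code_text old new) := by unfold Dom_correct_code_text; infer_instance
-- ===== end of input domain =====

-- B replaces A's index-walking span extraction (repeated str.index + slicing) by a one-pass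
-- state-machine scan (objective: alternative); the replace phase is kept byte-for-byte identical.

-- ===== PORT A =====
-- A's for-loop over range(int(old_code_cnt/2)) threading (old_idx, new_idx, result); the loop
-- variable i is unused, so the loop is ported as recursion on the remaining iteration count.
-- Under the guard every str.index call succeeds, so findFrom (Python's find) never returns -1 here.
def pvALoop (old : String) (new : String) : Nat → Int → Int → String → String
  | 0, _, _, result => result
  | n+1, old_idx, new_idx, result =>
    let first_old := PySem.Str.findFrom old "`" old_idx
    let old_idx1 := first_old + 1
    let second_old := PySem.Str.findFrom old "`" old_idx1
    let old_idx2 := second_old + 1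
    let first_new := PySem.Str.findFrom new "`" new_idx
    let new_idx1 := first_new + 1
    let second_new := PySem.Str.findFrom new "`" new_idx1
    let new_idx2 := second_new + 1
    let old_str := PySem.Str.slice old (some first_old) (some (second_old + 1))
    let new_str := PySem.Str.slice new (some first_new) (some (second_new + 1))
    pvALoop old new n old_idx2 new_idx2 (PySem.Str.replace result new_str old_str)

-- int(old_code_cnt/2) is ported as old_code_cnt / 2 (exact: the count is a natural number).
def correct_code_text (old : String) (new : String) : String :=
  let old_code_cnt := PySem.Str.count old "`"
  let new_code_cnt := PySem.Str.count new "`"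
  let result := new
  if old_code_cnt = new_code_cnt ∧ old_code_cnt % 2 = 0 ∧ new_code_cnt % 2 = 0 then
    pvALoop old new (old_code_cnt / 2) 0 0 result
  else result

-- ===== PORT B =====
-- _spans's loop body: state (spans, cur, inside); the Python strings cur and the collected
-- spans are represented as List Char (cur + ch is cur ++ [ch], spans.append is spans ++ [cur]).
def pvBStep (st : List (List Char) × List Char × Bool) (ch : Char) : List (List Char) × List Char × Bool :=
  if st.2.2 then
    let cur := st.2.1 ++ [ch]
    if ch = '`' then (st.1 ++ [cur], cur, false) else (st.1, cur, true)
  else if ch = '`' then (st.1, ['`'], true)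
  else st

def pvSpans (s : String) : List (List Char) :=
  (s.toList.foldl pvBStep ([], [], false)).1

def correct_code_text_alt (old : String) (new : String) : String :=
  let result := new
  if PySem.Str.count old "`" = PySem.Str.count new "`" ∧ PySem.Str.count old "`" % 2 = 0 then
    ((pvSpans old).zip (pvSpans new)).foldl
      (fun result p => PySem.Str.replace result (String.ofList p.2) (String.ofList p.1)) result
  else result

-- ===== PRECONDITION & SPEC =====
def Spec_correct_code_text (old : String) (new : String) (out : String) : Prop := out = correct_code_text_alt old new
instance (old : String) (new : String) (out : String) : Decidable (Spec_correct_code_text old new out) := by unfold Spec_correct_code_text; infer_instance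

-- ===== CLAIM (what is proved, stated in full; the proofs are below) =====
def Claim_equal_correct_code_text : Prop := ∀ (old : String) (new : String), Dom_correct_code_text old new → Spec_correct_code_text old new (correct_code_text old new)

-- ===== LEMMAS AND PROOFS =====

-- the canonical list of the n backtick spans of a string, read off by takeWhile/dropWhile
def pvCanon : Nat → List Char → List (List Char)
  | 0, _ => []
  | n+1, l =>
    ('`' :: (((l.dropWhile (· ≠ '`')).tail.takeWhile (· ≠ '`')) ++ ['`'])) ::
      pvCanon n ((l.dropWhile (· ≠ '`')).tail.dropWhile (· ≠ '`')).tail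

-- A's spans: the strings sliced out by the findFrom walk
def pvASpans (s : String) : Nat → Int → List String
  | 0, _ => []
  | n+1, idx =>
    let f := PySem.Str.findFrom s "`" idx
    let g := PySem.Str.findFrom s "`" (f+1)
    PySem.Str.slice s (some f) (some (g+1)) :: pvASpans s n (g+1)

lemma pvALoop_eq_fold (old new : String) :
    ∀ (n : Nat) (oi ni : Int) (r : String),
    pvALoop old new n oi ni r =
      ((pvASpans old n oi).zip (pvASpans new n ni)).foldl
        (fun r p => PySem.Str.replace r p.2 p.1) r := by
  intro n
  induction n with
  | zero => intro oi ni r; rfl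
  | succ m ih =>
    intro oi ni r
    simp only [pvALoop, pvASpans, List.zip_cons_cons, List.foldl_cons]
    exact ih _ _ _

lemma pvCountGo (c : Char) : ∀ (l : List Char) (fuel acc : Nat), l.length ≤ fuel →
    PySem.Chars.count.go [c] fuel l acc = acc + l.count c := by
  intro l
  induction l with
  | nil => intro fuel acc _; cases fuel <;> simp [PySem.Chars.count.go]
  | cons x t ih =>
    intro fuel acc hf
    cases fuel with
    | zero => simp at hf
    | succ f =>
      simp only [PySem.Chars.count.go]
      by_cases hx : c = x
      · subst hx
        simp [List.isPrefixOf]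
        rw [ih f (acc+1) (by simpa using hf)]
        omega
      · simp [List.isPrefixOf, hx]
        rw [ih f acc (by simpa using hf)]
        simp [Ne.symm hx]

lemma pvCountSingle (s : List Char) (c : Char) : PySem.Chars.count s [c] = s.count c := by
  simp [PySem.Chars.count, pvCountGo c s s.length 0 le_rfl]

lemma pvStrCount (s : String) : PySem.Str.count s "`" = s.toList.count '`' := by
  have : ("`" : String).toList = ['`'] := by decide
  simp [PySem.Str.count, this, pvCountSingle]

lemma pvPrefixSingle (b : Char) (l : List Char) : [b] <+: l ↔ l[0]? = some b := by
  cases l with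
  | nil => simp
  | cons x t =>
    constructor
    · rintro ⟨u, hu⟩
      simp at hu
      simp [hu.1]
    · intro h
      simp at h
      exact ⟨t, by simp [h]⟩

lemma pvDecomp (l : List Char) (h : 0 < l.count '`') :
    l = l.takeWhile (· ≠ '`') ++ '`' :: (l.dropWhile (· ≠ '`')).tail ∧
      ∀ c ∈ l.takeWhile (· ≠ '`'), c ≠ '`' := by
  have hmem : '`' ∈ l := List.count_pos_iff.mp h
  have hne : l.dropWhile (· ≠ '`') ≠ [] := by
    intro hnil
    have := List.takeWhile_append_dropWhile (p := (· ≠ '`')) (l := l)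
    rw [hnil, List.append_nil] at this
    rw [← this] at hmem
    have := List.mem_takeWhile_imp hmem
    simp at this
  constructor
  · have hhead : (l.dropWhile (· ≠ '`')).head hne = '`' := by
      have := List.head_dropWhile_not (p := (· ≠ '`')) (l := l) hne
      simpa using this
    conv_lhs => rw [← List.takeWhile_append_dropWhile (p := (· ≠ '`')) (l := l)]
    rw [← List.cons_head_tail hne, hhead]
    simp
  · intro c hc
    have := List.mem_takeWhile_imp hc
    simpa using this

lemma pvFindSingle (a r : List Char) (ha : ∀ c ∈ a, c ≠ '`') :
    PySem.Chars.find (a ++ '`' :: r) ['`'] = (a.length : Int) := by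
  set cs := a ++ '`' :: r with hcs
  have hinf : ['`'] <:+: cs := ⟨a, r, by simp [hcs]⟩
  have h0 : (0:Int) ≤ PySem.Chars.find cs ['`'] := (PySem.Chars.find_nonneg_iff cs ['`']).mpr hinf
  obtain ⟨hpre, hmin⟩ := PySem.Chars.find_spec h0
  set f := (PySem.Chars.find cs ['`']).toNat with hf
  have hfa : f = a.length := by
    by_contra hne
    rcases Nat.lt_or_ge f a.length with hlt | hge
    · rw [pvPrefixSingle, List.getElem?_drop] at hpre
      simp only [Nat.add_zero] at hpre
      rw [hcs, List.getElem?_append_left hlt] at hpre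
      have hmem : '`' ∈ a := List.mem_of_getElem? hpre
      exact ha _ hmem rfl
    · have hgt : a.length < f := lt_of_le_of_ne hge (Ne.symm hne)
      apply hmin a.length hgt
      rw [pvPrefixSingle, List.getElem?_drop]
      simp only [Nat.add_zero]
      rw [hcs, List.getElem?_append_right le_rfl]
      simp
  omega

lemma pvASpans_canon (s : String) : ∀ (n : Nat) (k : Nat), k ≤ s.toList.length →
    (s.toList.drop k).count '`' = 2*n →
    (pvASpans s n (k : Int)).map String.toList = pvCanon n (s.toList.drop k) := by
  intro n
  induction n with
  | zero => intro k _ _; simp [pvASpans, pvCanon]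
  | succ n ih =>
    intro k hk hc
    set cs := s.toList with hcsdef
    set l := cs.drop k with hldef
    obtain ⟨hl, ha⟩ := pvDecomp l (by omega)
    set a := l.takeWhile (· ≠ '`') with hadef
    set r := (l.dropWhile (· ≠ '`')).tail with hrdef
    have hcr : r.count '`' = 2*n + 1 := by
      have h1 : l.count '`' = a.count '`' + 1 + r.count '`' := by
        conv_lhs => rw [hl]
        simp [List.count_append]
        omega
      have haz : a.count '`' = 0 := List.count_eq_zero.mpr (fun hmem => ha _ hmem rfl)
      omega
    obtain ⟨hr, hm⟩ := pvDecomp r (by omega)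
    set m := r.takeWhile (· ≠ '`') with hmdef
    set r2 := (r.dropWhile (· ≠ '`')).tail with hr2def
    have hcr2 : r2.count '`' = 2*n := by
      have h1 : r.count '`' = m.count '`' + 1 + r2.count '`' := by
        conv_lhs => rw [hr]
        simp [List.count_append]
        omega
      have hmz : m.count '`' = 0 := List.count_eq_zero.mpr (fun hmem => hm _ hmem rfl)
      omega
    have hlenl : l.length = cs.length - k := by rw [hldef]; simp
    have hlen1 : k + (a.length + 1 + r.length) = cs.length := by
      have : l.length = a.length + 1 + r.length := by rw [hl]; simp; omega
      omega
    have htick : ("`" : String).toList = ['`'] := by decide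
    have hdropk : cs.drop k = a ++ '`' :: r := by rw [← hldef, hl]
    have hfind1 : PySem.Chars.find (cs.drop k) ['`'] = (a.length : Int) := by
      rw [hdropk]; exact pvFindSingle a r ha
    have hF1 : PySem.Str.findFrom s "`" (k : Int) = ((k + a.length : Nat) : Int) := by
      rw [PySem.Str.findFrom_eq, htick, ← hcsdef]
      rw [PySem.Chars.findFrom_natCast cs ['`'] k hk]
      rw [hfind1]
      have h9 : ((a.length : Int)) ≠ -1 := by omega
      simp only [h9, if_false]
      push_cast
      ring
    have hdropK1 : cs.drop (k + a.length + 1) = r := by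
      have : cs.drop (k + a.length + 1) = (cs.drop k).drop (a.length + 1) := by
        rw [List.drop_drop]; ring_nf
      rw [this, hdropk]
      rw [show a.length + 1 = (a ++ ['`']).length by simp]
      rw [show a ++ '`' :: r = (a ++ ['`']) ++ r by simp]
      rw [List.drop_left]
    have hK1le : k + a.length + 1 ≤ cs.length := by omega
    have hfind2 : PySem.Chars.find (cs.drop (k + a.length + 1)) ['`'] = (m.length : Int) := by
      rw [hdropK1]
      conv_lhs => rw [hr]
      exact pvFindSingle m r2 hm
    have hF2 : PySem.Str.findFrom s "`" (((k + a.length : Nat) : Int) + 1)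
        = ((k + a.length + 1 + m.length : Nat) : Int) := by
      rw [PySem.Str.findFrom_eq, htick, ← hcsdef]
      rw [show (((k + a.length : Nat) : Int) + 1) = ((k + a.length + 1 : Nat) : Int) by push_cast; ring]
      rw [PySem.Chars.findFrom_natCast cs ['`'] (k + a.length + 1) hK1le]
      rw [hfind2]
      have h9 : ((m.length : Int)) ≠ -1 := by omega
      simp only [h9, if_false]
      push_cast
      ring
    have hlenr : r.length = m.length + 1 + r2.length := by rw [hr]; simp; omega
    have hdropK : cs.drop (k + a.length) = '`' :: r := by
      have h8 : cs.drop (k + a.length) = (cs.drop k).drop a.length := by rw [List.drop_drop]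
      rw [h8, hdropk, List.drop_left]
    have hslice : (PySem.Str.slice s (some ((k + a.length : Nat) : Int))
        (some (((k + a.length + 1 + m.length : Nat) : Int) + 1))).toList = '`' :: (m ++ ['`']) := by
      rw [show (((k + a.length + 1 + m.length : Nat) : Int) + 1) = ((k + a.length + 1 + m.length + 1 : Nat) : Int) by push_cast; ring]
      rw [PySem.Str.toList_slice, PySem.Chars.slice_eq_listSlice, ← hcsdef]
      rw [PySem.List.slice_natCast]
      rw [show k + a.length + 1 + m.length + 1 - (k + a.length) = m.length + 2 by omega]
      rw [hdropK]
      conv_lhs => rw [hr]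
      simp [List.take_append]
    simp only [pvASpans, hF1, hF2, List.map_cons]
    rw [hslice]
    have hdropfin : cs.drop (k + a.length + 1 + m.length + 1) = r2 := by
      have : cs.drop (k + a.length + 1 + m.length + 1) = (cs.drop (k + a.length + 1)).drop (m.length + 1) := by
        rw [List.drop_drop]; ring_nf
      rw [this, hdropK1]
      conv_lhs => rw [hr]
      rw [show m.length + 1 = (m ++ ['`']).length by simp]
      rw [show m ++ '`' :: r2 = (m ++ ['`']) ++ r2 by simp]
      rw [List.drop_left]
    have hrec : (pvASpans s n (((k + a.length + 1 + m.length : Nat) : Int) + 1)).map String.toList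
        = pvCanon n r2 := by
      rw [show (((k + a.length + 1 + m.length : Nat) : Int) + 1) = ((k + a.length + 1 + m.length + 1 : Nat) : Int) by push_cast; ring]
      rw [ih (k + a.length + 1 + m.length + 1) (by omega) (by rw [hdropfin]; exact hcr2)]
      rw [hdropfin]
    rw [hrec]
    have hcanon : pvCanon (n+1) (cs.drop k) = ('`' :: (m ++ ['`'])) :: pvCanon n r2 := by
      simp only [pvCanon]
      rw [← hldef, ← hrdef, ← hmdef, ← hr2def]
    rw [hcanon]

lemma pvFoldFalse (a : List Char) (sp : List (List Char)) (cur : List Char)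
    (h : ∀ c ∈ a, c ≠ '`') : a.foldl pvBStep (sp, cur, false) = (sp, cur, false) := by
  induction a with
  | nil => rfl
  | cons x t ih =>
    have hx : x ≠ '`' := h x (by simp)
    simp only [List.foldl_cons, pvBStep]
    simp [hx]
    exact ih fun c hc => h c (by simp [hc])

lemma pvFoldTrue (m : List Char) (sp : List (List Char)) (cur : List Char)
    (h : ∀ c ∈ m, c ≠ '`') : m.foldl pvBStep (sp, cur, true) = (sp, cur ++ m, true) := by
  induction m generalizing cur with
  | nil => simp
  | cons x t ih =>
    have hx : x ≠ '`' := h x (by simp)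
    simp only [List.foldl_cons, pvBStep]
    simp [hx]
    rw [ih (cur ++ [x]) fun c hc => h c (by simp [hc])]
    simp

lemma pvSpansGo : ∀ (n : Nat) (l : List Char) (sp : List (List Char)) (cur : List Char),
    l.count '`' = 2*n → (l.foldl pvBStep (sp, cur, false)).1 = sp ++ pvCanon n l := by
  intro n
  induction n with
  | zero =>
    intro l sp cur hc
    have h0 : ∀ c ∈ l, c ≠ '`' := by
      intro c hcm hce
      subst hce
      have := List.count_pos_iff.mpr hcm
      omega
    rw [pvFoldFalse l sp cur h0]
    simp [pvCanon]
  | succ m ih =>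
    intro l sp cur hc
    obtain ⟨hl, ha⟩ := pvDecomp l (by omega)
    set a := l.takeWhile (· ≠ '`') with hadef
    set r := (l.dropWhile (· ≠ '`')).tail with hrdef
    have hcr : r.count '`' = 2*m + 1 := by
      have : l.count '`' = a.count '`' + ('`' :: r).count '`' := by
        rw [hl] at hc ⊢; simp [List.count_append]
      have haz : a.count '`' = 0 := by
        rw [List.count_eq_zero]
        intro hmem
        exact ha _ hmem rfl
      rw [List.count_cons] at this
      simp at this
      omega
    obtain ⟨hr, hm⟩ := pvDecomp r (by omega)
    set b := r.takeWhile (· ≠ '`') with hbdef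
    set r2 := (r.dropWhile (· ≠ '`')).tail with hr2def
    have hcr2 : r2.count '`' = 2*m := by
      have : r.count '`' = b.count '`' + ('`' :: r2).count '`' := by
        rw [hr] at hcr ⊢; simp [List.count_append]
      have hbz : b.count '`' = 0 := by
        rw [List.count_eq_zero]; intro hmem; exact hm _ hmem rfl
      rw [List.count_cons] at this
      simp at this
      omega
    have hps : l = a ++ '`' :: (b ++ '`' :: r2) := by rw [hl, hr]
    conv_lhs => rw [hps]
    rw [List.foldl_append]
    rw [pvFoldFalse a sp cur ha]
    rw [List.foldl_cons]
    have hstep1 : pvBStep (sp, cur, false) '`' = (sp, ['`'], true) := by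
      simp [pvBStep]
    rw [hstep1]
    rw [show (b ++ '`' :: r2) = b ++ ['`'] ++ r2 by simp]
    rw [List.foldl_append, List.foldl_append]
    rw [pvFoldTrue b sp ['`'] hm]
    have hstep2 : List.foldl pvBStep (sp, ['`'] ++ b, true) ['`'] =
        (sp ++ [('`' :: b) ++ ['`']], ('`' :: b) ++ ['`'], false) := by
      simp [pvBStep]
    rw [hstep2]
    rw [ih r2 _ _ hcr2]
    have hcanon : pvCanon (m+1) l = ('`' :: (b ++ ['`'])) :: pvCanon m r2 := by
      simp only [pvCanon]
      rw [← hrdef, ← hbdef, ← hr2def]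
    rw [hcanon]
    simp

lemma pvFoldEq : ∀ (xs ys : List String) (as bs : List (List Char)) (r : String),
    xs.map String.toList = as → ys.map String.toList = bs →
    (xs.zip ys).foldl (fun r p => PySem.Str.replace r p.2 p.1) r =
      (as.zip bs).foldl
        (fun r p => PySem.Str.replace r (String.ofList p.2) (String.ofList p.1)) r := by
  intro xs
  induction xs with
  | nil => rintro ys as bs r rfl rfl; simp
  | cons x xt ih =>
    rintro ys as bs r rfl rfl
    cases ys with
    | nil => simp
    | cons y yt =>
      simp only [List.map_cons, List.zip_cons_cons, List.foldl_cons]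
      rw [ih yt _ _ _ rfl rfl]
      congr 1
      simp [PySem.Str.replace]

-- ===== VERDICT (by name: the statement is the Claim_ definition above) =====
theorem correct_code_text_spec : Claim_equal_correct_code_text := by
  intro old new _dom
  unfold Spec_correct_code_text
  simp only [correct_code_text, correct_code_text_alt]
  by_cases h : PySem.Str.count old "`" = PySem.Str.count new "`" ∧ PySem.Str.count old "`" % 2 = 0
  · have hA : PySem.Str.count old "`" = PySem.Str.count new "`" ∧ PySem.Str.count old "`" % 2 = 0 ∧
        PySem.Str.count new "`" % 2 = 0 := ⟨h.1, h.2, h.1 ▸ h.2⟩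
    rw [if_pos hA, if_pos h]
    set n := PySem.Str.count old "`" / 2 with hn
    have hco : old.toList.count '`' = 2 * n := by
      rw [← pvStrCount]; omega
    have hcn : new.toList.count '`' = 2 * n := by
      rw [← pvStrCount, ← h.1]; omega
    rw [pvALoop_eq_fold]
    have hAo : (pvASpans old n ((0:Nat) : Int)).map String.toList = pvCanon n old.toList := by
      have := pvASpans_canon old n 0 (Nat.zero_le _) (by simpa using hco)
      simpa using this
    have hAn : (pvASpans new n ((0:Nat) : Int)).map String.toList = pvCanon n new.toList := by
      have := pvASpans_canon new n 0 (Nat.zero_le _) (by simpa using hcn)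
      simpa using this
    have hBo : pvSpans old = pvCanon n old.toList := by
      have := pvSpansGo n old.toList [] [] hco
      simpa [pvSpans] using this
    have hBn : pvSpans new = pvCanon n new.toList := by
      have := pvSpansGo n new.toList [] [] hcn
      simpa [pvSpans] using this
    rw [hBo, hBn]
    exact pvFoldEq _ _ _ _ new (by simpa using hAo) (by simpa using hAn)
  · have hA : ¬(PySem.Str.count old "`" = PySem.Str.count new "`" ∧ PySem.Str.count old "`" % 2 = 0 ∧
        PySem.Str.count new "`" % 2 = 0) := fun hh => h ⟨hh.1, hh.2.1⟩
    rw [if_neg hA, if_neg h]
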